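-- pv_equiv track=rewrite | github.com/CastleBomber/project-euler | python/5-Smallest-Multiple.py | find
-- ===== SOURCE A (Python) =====
-- def find(primes, smallestNumber):
--     truths = 0 # check for how many primes our # is div by
--
--     while len(primes) > truths:
--         smallestNumber += 1
--         truths = 0
--         for i in primes:
--             if smallestNumber%i: # No, not divisible
--                 break
--             else: # yes, divisible
--                 truths += 1
--     return smallestNumber
-- ===== SOURCE B (Python) =====
-- def find(primes, smallestNumber):
--     if not primes:
--         return smallestNumber
--     L = 1
--     for p in primes:
--         g, r = L, abs(p)
--         while r:
--             g, r = r, g % r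
--         L = L // g * abs(p)
--     return smallestNumber + L - smallestNumber % L
-- ===== Notes on version B (the rewrite author's own statement) =====
-- stated objective: faster
-- what changed: B replaces A's trial loop (increment the candidate and re-test divisibility by every prime until all pass) with a single Euclid-gcd LCM computation and one closed-form modular step to the next strict multiple; intended as faster (O(answer) vs O(|primes|) iterations) — a timing run saw A time out at n=16 where B returned, but could not measure a ratio at a size both finish.
import Mathlib
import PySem

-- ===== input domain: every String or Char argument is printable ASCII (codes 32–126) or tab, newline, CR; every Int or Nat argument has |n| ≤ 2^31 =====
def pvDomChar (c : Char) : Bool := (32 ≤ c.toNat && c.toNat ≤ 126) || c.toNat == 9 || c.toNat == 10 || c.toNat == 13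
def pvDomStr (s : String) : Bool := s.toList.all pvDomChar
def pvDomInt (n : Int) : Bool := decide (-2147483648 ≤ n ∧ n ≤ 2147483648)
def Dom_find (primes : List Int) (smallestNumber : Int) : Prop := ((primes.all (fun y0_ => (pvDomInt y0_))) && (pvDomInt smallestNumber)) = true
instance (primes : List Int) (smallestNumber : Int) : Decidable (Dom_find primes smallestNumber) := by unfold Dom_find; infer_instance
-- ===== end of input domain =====

-- B computes the LCM of the primes once (Euclid's gcd) and jumps to the next strict multiple
-- arithmetically, instead of A's candidate-by-candidate trial division; intended as faster
-- (a timing run saw A time out where B returned, but could not measure a clean ratio).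

-- ===== PORT A =====
-- the inner `for i in primes: if smallestNumber % i: break else truths += 1` of A:
-- truths = length of the longest prefix of primes all dividing n
def innerCount (primes : List Int) (n : Int) : Nat :=
  match primes with
  | [] => 0
  | i :: rest => if PySem.Int.mod n i ≠ 0 then 0 else innerCount rest n + 1

-- the Nat-level lcm of |primes|, used only as a termination certificate for A's while loop
def lcmNat (primes : List Int) : Nat :=
  primes.foldl (fun a p => Nat.lcm a p.natAbs) 1

theorem dvd_foldl_lcm_init (l : List Int) : ∀ a : Nat, a ∣ l.foldl (fun a p => Nat.lcm a p.natAbs) a := by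
  induction l with
  | nil => intro a; simp
  | cons x t ih =>
    intro a
    simpa using (Nat.dvd_lcm_left a x.natAbs).trans (ih (Nat.lcm a x.natAbs))

theorem mem_dvd_foldl_lcm (l : List Int) (p : Int) (hp : p ∈ l) :
    ∀ a : Nat, p.natAbs ∣ l.foldl (fun a p => Nat.lcm a p.natAbs) a := by
  induction l with
  | nil => cases hp
  | cons x t ih =>
    intro a
    rcases List.mem_cons.mp hp with h | h
    · subst h
      simpa using (Nat.dvd_lcm_right a p.natAbs).trans (dvd_foldl_lcm_init t (Nat.lcm a p.natAbs))
    · simpa using ih h (Nat.lcm a x.natAbs)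

theorem foldl_lcm_pos (l : List Int) (h0 : (0:Int) ∉ l) :
    ∀ a : Nat, 0 < a → 0 < l.foldl (fun a p => Nat.lcm a p.natAbs) a := by
  induction l with
  | nil => intro a ha; simpa using ha
  | cons x t ih =>
    intro a ha
    have hx : x ≠ 0 := fun hx => h0 (by simp [hx])
    have hxa : 0 < x.natAbs := Int.natAbs_pos.mpr hx
    simpa using ih (fun h => h0 (List.mem_cons_of_mem _ h)) (Nat.lcm a x.natAbs)
      (Nat.pos_of_ne_zero (Nat.lcm_ne_zero (by omega) (by omega)))

theorem lcmNat_pos (primes : List Int) (h0 : (0:Int) ∉ primes) : 0 < lcmNat primes :=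
  foldl_lcm_pos primes h0 1 one_pos

theorem natAbs_dvd_lcmNat (primes : List Int) (p : Int) (hp : p ∈ primes) :
    p.natAbs ∣ lcmNat primes :=
  mem_dvd_foldl_lcm primes p hp 1

-- if every prime divides m, the inner for-loop never breaks
theorem innerCount_eq_length (primes : List Int) (m : Int)
    (h : ∀ p ∈ primes, PySem.Int.mod m p = 0) : innerCount primes m = primes.length := by
  induction primes with
  | nil => rfl
  | cons x t ih =>
    simp [innerCount, h x (by simp)]
    exact ih (fun p hp => h p (List.mem_cons_of_mem _ hp))

-- conversely, a full count means every prime divides m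
theorem forall_dvd_of_innerCount (primes : List Int) (m : Int)
    (h : innerCount primes m = primes.length) : ∀ p ∈ primes, PySem.Int.mod m p = 0 := by
  induction primes with
  | nil => intro p hp; cases hp
  | cons x t ih =>
    intro p hp
    by_cases hx : PySem.Int.mod m x = 0
    · have ht : innerCount t m = t.length := by
        simpa [innerCount, hx] using h
      rcases List.mem_cons.mp hp with h' | h'
      · exact h' ▸ hx
      · exact ih ht p h'
    · exfalso
      have : (0:Nat) = t.length + 1 := by simpa [innerCount, hx] using h
      omega

theorem lcmNat_int_dvd (primes : List Int) (m : Int)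
    (h : ∀ p ∈ primes, PySem.Int.mod m p = 0) : ((lcmNat primes : Nat) : Int) ∣ m := by
  rw [Int.natCast_dvd]
  have key : ∀ (l : List Int), (∀ p ∈ l, p.natAbs ∣ m.natAbs) → ∀ a : Nat, a ∣ m.natAbs →
      l.foldl (fun a p => Nat.lcm a p.natAbs) a ∣ m.natAbs := by
    intro l
    induction l with
    | nil => intro _ a ha; simpa using ha
    | cons x t ih =>
      intro hl a ha
      simpa using ih (fun p hp => hl p (List.mem_cons_of_mem _ hp)) (Nat.lcm a x.natAbs)
        (Nat.lcm_dvd ha (hl x (by simp)))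
  refine key primes (fun p hp => ?_) 1 (one_dvd _)
  have : p ∣ m := (PySem.Int.mod_eq_zero_iff_dvd m p).mp (h p hp)
  rw [← Int.natAbs_dvd_natAbs] at this
  exact this

-- full count exactly when the lcm divides m (0 ∉ primes)
theorem innerCount_eq_length_iff (primes : List Int) (m : Int) (h0 : (0:Int) ∉ primes) :
    innerCount primes m = primes.length ↔ ((lcmNat primes : Nat) : Int) ∣ m := by
  constructor
  · exact fun h => lcmNat_int_dvd primes m (forall_dvd_of_innerCount primes m h)
  · intro h
    refine innerCount_eq_length primes m (fun p hp => ?_)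
    rw [PySem.Int.mod_eq_zero_iff_dvd]
    have h1 : ((p.natAbs : Nat) : Int) ∣ ((lcmNat primes : Nat) : Int) :=
      Int.natCast_dvd_natCast.mpr (natAbs_dvd_lcmNat primes p hp)
    exact (Int.natAbs_dvd).mp (h1.trans h)

-- the successor's residue mod L, used both for termination and for the loop value
theorem emod_succ_of_not_dvd (L : Nat) (hL : 0 < L) (n : Int) (hnd : ¬ ((L:Nat):Int) ∣ (n+1)) :
    (n+1) % (L:Int) = n % (L:Int) + 1 := by
  have hLZ : (0:Int) < (L:Int) := by exact_mod_cast hL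
  have ha0 : 0 ≤ n % (L:Int) := Int.emod_nonneg n (by omega)
  have haL : n % (L:Int) < (L:Int) := Int.emod_lt_of_pos n hLZ
  have hb0 : 0 ≤ (n+1) % (L:Int) := Int.emod_nonneg _ (by omega)
  have hbne : (n+1) % (L:Int) ≠ 0 := fun h => hnd (Int.dvd_of_emod_eq_zero h)
  have hL1 : (1:Int) < (L:Int) := by
    rcases lt_or_eq_of_le (by exact_mod_cast hL : (1:Int) ≤ (L:Int)) with h | h
    · exact h
    · exfalso; apply hbne; rw [← h]; simp
  have h1 : (1:Int) % (L:Int) = 1 := Int.emod_eq_of_lt (by omega) hL1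
  rw [Int.add_emod, h1]
  by_cases hc : n % (L:Int) + 1 = (L:Int)
  · exfalso; apply hbne
    rw [Int.add_emod, h1, hc]; simp
  · exact Int.emod_eq_of_lt (by omega) (by omega)

-- A's while loop; L together with the two proofs is a termination certificate only
def findLoop (primes : List Int) (L : Nat) (hL : 0 < L)
    (hdvd : ∀ m : Int, innerCount primes m = primes.length ↔ ((L:Nat):Int) ∣ m)
    (n : Int) (truths : Nat) : Int :=
  if primes.length > truths then
    findLoop primes L hL hdvd (n+1) (innerCount primes (n+1))
  else n
termination_by (if primes.length ≤ truths then 0 else ((L:Int) - n % (L:Int)).toNat)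
decreasing_by
  rename_i h
  have hLZ : (0:Int) < (L:Int) := by exact_mod_cast hL
  have ha0 : 0 ≤ n % (L:Int) := Int.emod_nonneg n (by omega)
  have haL : n % (L:Int) < (L:Int) := Int.emod_lt_of_pos n hLZ
  by_cases hfin : primes.length ≤ innerCount primes (n+1)
  · simp only [hfin, if_true, if_neg (by omega : ¬ primes.length ≤ truths)]
    omega
  · have hnd : ¬ ((L:Nat):Int) ∣ (n+1) := by
      intro hd
      exact hfin (le_of_eq ((hdvd (n+1)).mpr hd).symm)
    have := emod_succ_of_not_dvd L hL n hnd
    simp only [if_neg hfin, if_neg (by omega : ¬ primes.length ≤ truths)]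
    omega

def find (primes : List Int) (smallestNumber : Int) : Int :=
  if h : (0:Int) ∈ primes then
    smallestNumber  -- unreachable under Pre_find: Python raises ZeroDivisionError when 0 ∈ primes
  else
    findLoop primes (lcmNat primes) (lcmNat_pos primes h)
      (fun m => innerCount_eq_length_iff primes m h) smallestNumber 0

-- ===== PORT B =====
-- the hand-written Euclid loop of Source B: while r: g, r = r, g % r
def gcdLoop (g r : Int) : Int :=
  if r ≠ 0 then gcdLoop r (PySem.Int.mod g r) else g
termination_by r.natAbs
decreasing_by
  rename_i h
  rcases lt_or_gt_of_ne h with hneg | hpos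
  · have := PySem.Int.mod_neg_bounds g (b := r) hneg
    omega
  · have h1 := PySem.Int.mod_nonneg g (b := r) hpos
    have h2 := PySem.Int.mod_lt g (b := r) hpos
    omega

def find_alt (primes : List Int) (smallestNumber : Int) : Int :=
  if primes = [] then smallestNumber
  else
    let L := primes.foldl (fun L p => PySem.Int.floordiv L (gcdLoop L |p|) * |p|) 1
    smallestNumber + L - PySem.Int.mod smallestNumber L

-- ===== PRECONDITION & SPEC =====
-- Pre_ excludes only inputs containing 0, on which Python A (and B) raise ZeroDivisionError.
def Pre_find (primes : List Int) (smallestNumber : Int) : Prop := (0:Int) ∉ primes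
instance (primes : List Int) (smallestNumber : Int) : Decidable (Pre_find primes smallestNumber) := by unfold Pre_find; infer_instance

def pvWitness_find : List Int × Int := ([2, 3, 5], 10)

def Spec_find (primes : List Int) (smallestNumber : Int) (out : Int) : Prop := out = find_alt primes smallestNumber
instance (primes : List Int) (smallestNumber : Int) (out : Int) : Decidable (Spec_find primes smallestNumber out) := by unfold Spec_find; infer_instance

-- ===== CLAIM (what is proved, stated in full; the proofs are below) =====
def Claim_equal_find : Prop := ∀ (primes : List Int) (smallestNumber : Int), Dom_find primes smallestNumber → Pre_find primes smallestNumber → Spec_find primes smallestNumber (find primes smallestNumber)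

-- ===== LEMMAS AND PROOFS =====

theorem emod_pred_of_dvd (L : Nat) (hL : 0 < L) (n : Int) (hd : ((L:Nat):Int) ∣ (n+1)) :
    n % (L:Int) = (L:Int) - 1 := by
  have hLZ : (0:Int) < (L:Int) := by exact_mod_cast hL
  have ha0 : 0 ≤ n % (L:Int) := Int.emod_nonneg n (by omega)
  have haL : n % (L:Int) < (L:Int) := Int.emod_lt_of_pos n hLZ
  have hb : (n+1) % (L:Int) = 0 := Int.emod_eq_zero_of_dvd hd
  by_cases hL1 : (1:Int) < (L:Int)
  · have h1 : (1:Int) % (L:Int) = 1 := Int.emod_eq_of_lt (by omega) hL1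
    have hsplit := Int.add_emod n 1 (L:Int)
    rw [h1] at hsplit
    have key : (n % (L:Int) + 1) % (L:Int) = 0 := by
      rw [← hsplit]; exact hb
    by_cases hc : n % (L:Int) + 1 = (L:Int)
    · omega
    · exfalso
      have := Int.emod_eq_of_lt (a := n % (L:Int) + 1) (b := (L:Int)) (by omega) (by omega)
      omega
  · have hone : (L:Int) = 1 := by omega
    rw [hone]
    simp


-- A's loop jumps to the next strict multiple of L
theorem findLoop_val (primes : List Int) (L : Nat) (hL : 0 < L)
    (hdvd : ∀ m : Int, innerCount primes m = primes.length ↔ ((L:Nat):Int) ∣ m) :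
    ∀ (k : Nat) (n : Int) (truths : Nat), ((L:Int) - n % (L:Int)).toNat ≤ k →
      truths < primes.length →
      findLoop primes L hL hdvd n truths = n + ((L:Int) - n % (L:Int)) := by
  intro k
  induction k with
  | zero =>
    intro n truths hk _
    exfalso
    have hLZ : (0:Int) < (L:Int) := by exact_mod_cast hL
    have := Int.emod_lt_of_pos n hLZ
    omega
  | succ k ih =>
    intro n truths hk htr
    rw [findLoop, if_pos htr]
    by_cases hd : ((L:Nat):Int) ∣ (n+1)
    · have hfull : innerCount primes (n+1) = primes.length := (hdvd (n+1)).mpr hd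
      rw [findLoop, hfull, if_neg (by omega)]
      have := emod_pred_of_dvd L hL n hd
      omega
    · have hfull : innerCount primes (n+1) ≠ primes.length := fun h => hd ((hdvd (n+1)).mp h)
      have hlt : innerCount primes (n+1) < primes.length := by
        have : ∀ l : List Int, ∀ m : Int, innerCount l m ≤ l.length := by
          intro l; induction l with
          | nil => intro m; simp [innerCount]
          | cons x t iht =>
            intro m
            by_cases hx : PySem.Int.mod m x = 0 <;> simp [innerCount, hx] <;> exact iht m
        have := this primes (n+1)
        omega
      have hsm := emod_succ_of_not_dvd L hL n hd
      have hLZ : (0:Int) < (L:Int) := by exact_mod_cast hL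
      have ha0 : 0 ≤ n % (L:Int) := Int.emod_nonneg n (by omega)
      rw [ih (n+1) (innerCount primes (n+1)) (by omega) hlt]
      omega

-- Source B's Euclid loop is the (nonnegative) gcd on nonnegative inputs
theorem gcdLoop_eq_gcd : ∀ (k : Nat) (g r : Int), r.natAbs ≤ k → 0 ≤ g → 0 ≤ r →
    gcdLoop g r = (Int.gcd g r : Int) := by
  intro k
  induction k with
  | zero =>
    intro g r hk hg hr
    have : r = 0 := by omega
    subst this
    rw [gcdLoop]
    simp [Int.gcd, Int.natAbs_of_nonneg hg]
  | succ k ih =>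
    intro g r hk hg hr
    by_cases hr0 : r = 0
    · subst hr0
      rw [gcdLoop]
      simp [Int.gcd, Int.natAbs_of_nonneg hg]
    · have hrpos : 0 < r := lt_of_le_of_ne hr (Ne.symm hr0)
      rw [gcdLoop, if_pos hr0]
      have hmod : PySem.Int.mod g r = g % r := PySem.Int.mod_eq_emod_of_pos hrpos
      have h1 : 0 ≤ g % r := Int.emod_nonneg g hr0
      have h2 : g % r < r := Int.emod_lt_of_pos g hrpos
      rw [hmod, ih r (g % r) (by omega) hr (by omega)]
      congr 1
      -- gcd r (g % r) = gcd g r, via Nat.gcd_rec on the nonnegative representatives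
      have hgN : g = ((g.toNat : Nat) : Int) := (Int.toNat_of_nonneg hg).symm
      have hrN : r = ((r.toNat : Nat) : Int) := (Int.toNat_of_nonneg hr).symm
      rw [hgN, hrN, ← Int.natCast_mod]
      show Nat.gcd r.toNat (g.toNat % r.toNat) = Nat.gcd g.toNat r.toNat
      rw [Nat.gcd_comm r.toNat (g.toNat % r.toNat), ← Nat.gcd_rec r.toNat g.toNat,
        Nat.gcd_comm r.toNat g.toNat]

-- B's foldl over Int mirrors the Nat lcm fold
theorem div_gcd_mul (a b : Nat) (ha : 0 < a) : a / Nat.gcd a b * b = Nat.lcm a b := by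
  have hg : 0 < Nat.gcd a b := Nat.gcd_pos_of_pos_left b ha
  apply Nat.eq_of_mul_eq_mul_left hg
  rw [← Nat.mul_assoc, Nat.mul_div_cancel' (Nat.gcd_dvd_left a b), Nat.gcd_mul_lcm]

theorem foldl_int_eq_lcmNat (l : List Int) (h0 : (0:Int) ∉ l) :
    ∀ a : Nat, 0 < a →
      l.foldl (fun L p => PySem.Int.floordiv L (gcdLoop L |p|) * |p|) ((a : Nat) : Int)
        = ((l.foldl (fun a p => Nat.lcm a p.natAbs) a : Nat) : Int) := by
  induction l with
  | nil => intro a _; simp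
  | cons x t ih =>
    intro a ha
    have hx : x ≠ 0 := fun hx => h0 (by simp [hx])
    have hxa : 0 < x.natAbs := Int.natAbs_pos.mpr hx
    have habs : |x| = ((x.natAbs : Nat) : Int) := by
      rw [Int.abs_eq_natAbs]
    have hg : gcdLoop ((a:Nat):Int) |x| = ((Nat.gcd a x.natAbs : Nat) : Int) := by
      rw [habs, gcdLoop_eq_gcd x.natAbs ((a:Nat):Int) ((x.natAbs:Nat):Int) (by simp [Int.natAbs_abs])
        (by positivity) (by positivity), Int.gcd_natCast_natCast]
    have step : PySem.Int.floordiv ((a:Nat):Int) (gcdLoop ((a:Nat):Int) |x|) * |x|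
        = ((Nat.lcm a x.natAbs : Nat) : Int) := by
      rw [hg, habs, PySem.Int.floordiv_natCast, ← Int.natCast_mul, div_gcd_mul a x.natAbs ha]
    simp only [List.foldl_cons]
    rw [step]
    exact ih (fun h => h0 (List.mem_cons_of_mem _ h)) (Nat.lcm a x.natAbs)
      (Nat.pos_of_ne_zero (Nat.lcm_ne_zero (by omega) (by omega)))

-- ===== VERDICT (by name: the statement is the Claim_ definition above) =====
theorem find_spec : Claim_equal_find := by
  intro primes n _ hpre
  unfold Spec_find find find_alt
  rw [dif_neg hpre]
  by_cases hemp : primes = []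
  · subst hemp
    rw [findLoop]
    simp
  · rw [if_neg hemp]
    have hfold := foldl_int_eq_lcmNat primes hpre 1 one_pos
    simp only [Nat.cast_one] at hfold
    simp only [hfold]
    have hL := lcmNat_pos primes hpre
    have hlen : 0 < primes.length := List.length_pos_iff.mpr hemp
    rw [findLoop_val primes (lcmNat primes) hL (fun m => innerCount_eq_length_iff primes m hpre)
      ((((lcmNat primes):Int) - n % ((lcmNat primes):Int)).toNat) n 0 le_rfl hlen]
    have hmod : PySem.Int.mod n ((lcmNat primes : Nat) : Int) = n % ((lcmNat primes:Nat):Int) :=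
      PySem.Int.mod_eq_emod_of_pos (by exact_mod_cast hL)
    simp only [lcmNat] at hmod ⊢
    rw [hmod]
    ring
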